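-- pv_equiv track=rewrite | github.com/kcraguini/leetcode-practice | Medium/OneBits.py | getOneBits
-- ===== SOURCE A (Python) =====
-- def getOneBits(n):
--     def findTheBitArray(n):
--         bitTable = []
--         tempNum = 0
--         powerNum = 0
--
--         while n > tempNum:
--             tempNum = pow(2, powerNum)
--             if n < tempNum:
--                 break
--             bitTable.append(tempNum)
--             powerNum += 1
--         reverseBitTable = list(reversed(bitTable))
--         return reverseBitTable
--
--     bitTable = findTheBitArray(n)
--     cnt = 0
--     result = []
--     result.append(cnt)
--
--     for num in range(0, len(bitTable)):
--         if n - bitTable[num] >= 0: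
--             n = n - bitTable[num]
--             cnt += 1
--             result[0] = cnt
--             result.append(num + 1)
--
--     return result
-- ===== SOURCE B (Python) =====
-- def getOneBits(n):
--     if n <= 0:
--         return [0]
--     L = n.bit_length()
--     positions = [i + 1 for i in range(L) if (n >> (L - 1 - i)) & 1]
--     return [len(positions)] + positions
-- ===== Notes on version B (the rewrite author's own statement) =====
-- stated objective: simpler
-- what changed: Replaces A's build-a-power-of-two-table-then-greedy-subtract loop with a direct bit_length + bit-mask scan that reads each bit of n once.
import Mathlib
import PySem

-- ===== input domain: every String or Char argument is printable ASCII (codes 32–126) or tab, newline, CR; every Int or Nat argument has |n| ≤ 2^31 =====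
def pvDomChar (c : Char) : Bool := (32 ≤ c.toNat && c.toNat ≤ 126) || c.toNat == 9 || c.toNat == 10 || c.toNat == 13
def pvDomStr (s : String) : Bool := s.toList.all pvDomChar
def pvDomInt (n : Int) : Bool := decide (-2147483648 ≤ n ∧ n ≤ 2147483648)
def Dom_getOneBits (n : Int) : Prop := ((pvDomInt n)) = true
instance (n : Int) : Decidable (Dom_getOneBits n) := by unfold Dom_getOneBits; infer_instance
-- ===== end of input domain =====

-- B replaces A's power-table + greedy-subtract strategy with a direct bit_length + bit-mask scan (simpler).

-- ===== PORT A =====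
-- the inner while loop of findTheBitArray; fuel 64 suffices for every |n| ≤ 2^31
def pvFindLoop (n : Int) (tempNum : Int) (powerNum : Nat) (bitTable : List Int) (fuel : Nat) : List Int :=
  match fuel with
  | 0 => bitTable
  | f + 1 =>
    if n > tempNum then
      let t : Int := 2 ^ powerNum
      if n < t then bitTable
      else pvFindLoop n t (powerNum + 1) (bitTable ++ [t]) f
    else bitTable

-- the body of A's for-loop: state (n, cnt, result)
def pvStep (bitTable : List Int) (s : Int × Int × List Int) (num : Nat) : Int × Int × List Int :=
  if s.1 - bitTable.getD num 0 ≥ 0 then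
    (s.1 - bitTable.getD num 0, s.2.1 + 1, (s.2.2.set 0 (s.2.1 + 1)) ++ [(num : Int) + 1])
  else s

def getOneBits (n : Int) : List Int :=
  let bitTable := (pvFindLoop n 0 0 [] 64).reverse
  ((List.range bitTable.length).foldl (pvStep bitTable) (n, 0, [0])).2.2

-- ===== PORT B =====
def getOneBits_alt (n : Int) : List Int :=
  if n ≤ 0 then [0]
  else
    let m := n.toNat
    let L := Nat.size m
    let positions := ((List.range L).filter (fun i => (m >>> (L - 1 - i)) &&& 1 != 0)).map
      (fun i => (i : Int) + 1)
    ((positions.length : Int)) :: positions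

-- ===== PRECONDITION & SPEC =====
def Spec_getOneBits (n : Int) (out : List Int) : Prop := out = getOneBits_alt n
instance (n : Int) (out : List Int) : Decidable (Spec_getOneBits n out) := by unfold Spec_getOneBits; infer_instance

-- ===== CLAIM (what is proved, stated in full; the proofs are below) =====
def Claim_equal_getOneBits : Prop := ∀ (n : Int), Dom_getOneBits n → Spec_getOneBits n (getOneBits n)

-- ===== LEMMAS AND PROOFS =====

-- A's while loop produces the ascending powers 2^p, …, 2^(size-1)
lemma pvFindLoop_spec (n : Int) (hn : 0 < n) :
    ∀ (f p : Nat) (acc : List Int) (tempNum : Int),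
      n.toNat.size ≤ p + f → ((2:Int) ^ p ≤ n → tempNum < n) →
      pvFindLoop n tempNum p acc f
        = acc ++ (List.range (n.toNat.size - p)).map (fun i => (2:Int) ^ (p + i)) := by
  intro f
  induction f with
  | zero =>
    intro p acc tempNum hf _
    simp [pvFindLoop, Nat.sub_eq_zero_of_le (by omega : n.toNat.size ≤ p)]
  | succ f ih =>
    intro p acc tempNum hf hguard
    have hncast : ((n.toNat : Int)) = n := Int.toNat_of_nonneg (le_of_lt hn)
    rw [pvFindLoop]
    by_cases hg : n > tempNum
    · simp only [hg, if_true]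
      by_cases hlt : n < (2:Int) ^ p
      · have hmlt : n.toNat < 2 ^ p := by
          have : n < ((2 ^ p : Nat) : Int) := by push_cast; exact hlt
          omega
        have : n.toNat.size ≤ p := Nat.size_le.mpr hmlt
        simp [hlt, Nat.sub_eq_zero_of_le this]
      · have hle : (2:Int) ^ p ≤ n := le_of_not_gt hlt
        have hmle : 2 ^ p ≤ n.toNat := by
          have : ((2 ^ p : Nat) : Int) ≤ n := by push_cast; exact hle
          omega
        have hplt : p < n.toNat.size := Nat.lt_size.mpr hmle
        simp only [hlt, if_false]
        rw [ih (p + 1) (acc ++ [(2:Int) ^ p]) ((2:Int) ^ p) (by omega)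
            (fun h => lt_of_lt_of_le (pow_lt_pow_right₀ (by norm_num) (Nat.lt_succ_self p)) h)]
        have hrange : n.toNat.size - p = (n.toNat.size - (p + 1)) + 1 := by omega
        rw [hrange, List.range_succ_eq_map]
        simp only [List.map_cons, List.map_map, pow_zero, List.append_assoc, List.cons_append,
          List.nil_append, add_zero, List.singleton_append]
        congr 1
        congr 1
        exact List.map_congr_left (fun i _ => by
          simp only [Function.comp_apply]
          congr 1
          omega)
    · have hnp : n < (2:Int) ^ p := by
        by_contra h
        exact hg (hguard (le_of_not_gt h))
      have hsz : n.toNat.size ≤ p := Nat.size_le.mpr (by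
        have : n < ((2 ^ p : Nat) : Int) := by push_cast; exact hnp
        omega)
      rw [if_neg hg]
      simp [Nat.sub_eq_zero_of_le hsz]

-- reversing the ascending power table gives the descending one
lemma reverse_pow_table (L : Nat) :
    ((List.range L).map (fun i => (2:Int) ^ i)).reverse
      = (List.range L).map (fun i => (2:Int) ^ (L - 1 - i)) := by
  apply List.ext_getElem
  · simp
  · intro i h1 h2
    simp only [List.length_reverse, List.length_map, List.length_range] at h1
    rw [List.getElem_reverse]
    simp only [List.length_map, List.length_range]
    rw [List.getElem_map, List.getElem_map, List.getElem_range, List.getElem_range]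

-- bit decomposition of one mod step
lemma mod_pow_succ_bit (m e : Nat) :
    m % 2 ^ (e + 1) = 2 ^ e * (m / 2 ^ e % 2) + m % 2 ^ e := by
  have h1 : m / 2 ^ e % 2 = m % (2 ^ e * 2) / 2 ^ e := (Nat.mod_mul_right_div_self m (2 ^ e) 2).symm
  rw [h1, ← pow_succ]
  have h2 : m % 2 ^ (e + 1) % 2 ^ e = m % 2 ^ e :=
    Nat.mod_mod_of_dvd m (pow_dvd_pow 2 (Nat.le_succ e))
  conv_lhs => rw [← Nat.div_add_mod (m % 2 ^ (e + 1)) (2 ^ e)]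
  rw [h2]

lemma getD_pow_table (L j : Nat) (hj : j < L) :
    ((List.range L).map (fun i => (2:Int) ^ (L - 1 - i))).getD j 0 = (2:Int) ^ (L - 1 - j) := by
  rw [List.getD_eq_getElem?_getD]
  simp [List.getElem?_range, hj]

-- the main loop invariant for A's greedy subtraction
lemma fold_spec (m : Nat) (bt : List Int)
    (hbt : ∀ j, j < m.size → bt.getD j 0 = (2:Int) ^ (m.size - 1 - j)) :
    ∀ (k j : Nat), j + k = m.size → ∀ (cnt : Int) (rest : List Int),
      (List.range' j k).foldl (pvStep bt)
          (((m % 2 ^ (m.size - j) : Nat) : Int), cnt, cnt :: rest)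
        = (((m % 2 ^ 0 : Nat) : Int),
           cnt + ((List.range' j k).filter (fun i => m / 2 ^ (m.size - 1 - i) % 2 == 1)).length,
           (cnt + ((List.range' j k).filter (fun i => m / 2 ^ (m.size - 1 - i) % 2 == 1)).length) ::
             (rest ++ ((List.range' j k).filter (fun i => m / 2 ^ (m.size - 1 - i) % 2 == 1)).map
               (fun i => (i : Int) + 1))) := by
  intro k
  induction k with
  | zero =>
    intro j hj cnt rest
    have hje : j = m.size := by omega
    subst hje
    simp
  | succ k ih =>
    intro j hj cnt rest
    have hjlt : j < m.size := by omega
    set e := m.size - 1 - j with he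
    have hse : m.size - j = e + 1 := by omega
    have hse2 : m.size - (j + 1) = e := by omega
    have hdecomp := mod_pow_succ_bit m e
    have hmlt : m % 2 ^ e < 2 ^ e := Nat.mod_lt _ (by positivity)
    have hb2 : m / 2 ^ e % 2 < 2 := Nat.mod_lt _ (by norm_num)
    rw [List.range'_succ, List.foldl_cons]
    have hgetD := hbt j hjlt
    have hcast : ((2 ^ e : Nat) : Int) = (2:Int) ^ e := by push_cast; ring
    by_cases hbit : m / 2 ^ e % 2 = 1
    · -- bit set: subtraction fires
      have hsum : m % 2 ^ (e + 1) = 2 ^ e + m % 2 ^ e := by rw [hdecomp, hbit]; ring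
      have hcond : (((m % 2 ^ (m.size - j) : Nat) : Int)) - bt.getD j 0 ≥ 0 := by
        rw [hgetD, hse, ← he, ← hcast]
        omega
      have hstep : pvStep bt (((m % 2 ^ (m.size - j) : Nat) : Int), cnt, cnt :: rest) j
          = (((m % 2 ^ (m.size - (j + 1)) : Nat) : Int), cnt + 1,
             (cnt + 1) :: (rest ++ [(j : Int) + 1])) := by
        unfold pvStep
        rw [if_pos hcond]
        have h1 : ((m % 2 ^ (m.size - j) : Nat) : Int) - bt.getD j 0
            = ((m % 2 ^ (m.size - (j + 1)) : Nat) : Int) := by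
          rw [hgetD, hse, hse2, ← he, ← hcast]
          omega
        rw [h1]
        simp
      rw [hstep, ih (j + 1) (by omega) (cnt + 1) (rest ++ [(j : Int) + 1])]
      have hpred : (m / 2 ^ (m.size - 1 - j) % 2 == 1) = true := by
        simp [← he, hbit]
      simp only [List.filter_cons, hpred, if_true, List.length_cons, List.map_cons,
        Prod.mk.injEq, List.cons.injEq, List.append_assoc, List.cons_append,
        List.singleton_append]
      and_intros <;> first | trivial | (push_cast; ring)
    · -- bit clear: subtraction does not fire
      have hbit0 : m / 2 ^ e % 2 = 0 := by omega
      have hsum0 : m % 2 ^ (e + 1) = m % 2 ^ e := by rw [hdecomp, hbit0]; ring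
      have hcond : ¬ ((((m % 2 ^ (m.size - j) : Nat) : Int)) - bt.getD j 0 ≥ 0) := by
        rw [hgetD, hse, ← he, ← hcast]
        omega
      have hstep : pvStep bt (((m % 2 ^ (m.size - j) : Nat) : Int), cnt, cnt :: rest) j
          = (((m % 2 ^ (m.size - (j + 1)) : Nat) : Int), cnt, cnt :: rest) := by
        unfold pvStep
        rw [if_neg hcond, hse, hse2, hsum0]
      rw [hstep, ih (j + 1) (by omega) cnt rest]
      have hpred : (m / 2 ^ (m.size - 1 - j) % 2 == 1) = false := by
        simp [← he, hbit0]
      simp [List.filter_cons, hpred]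

-- ===== VERDICT (by name: the statement is the Claim_ definition above) =====
-- A's predicate on each bit equals B's shift-and-mask test
lemma pred_eq (m L i : Nat) :
    ((m >>> (L - 1 - i)) &&& 1 != 0) = (m / 2 ^ (L - 1 - i) % 2 == 1) := by
  rw [Nat.shiftRight_eq_div_pow, Nat.and_one_is_mod]
  rcases Nat.mod_two_eq_zero_or_one (m / 2 ^ (L - 1 - i)) with h | h <;> simp [h]

theorem getOneBits_spec : Claim_equal_getOneBits := by
  intro n hdom
  unfold Spec_getOneBits getOneBits getOneBits_alt
  by_cases hn : n ≤ 0
  · have hloop : pvFindLoop n 0 0 [] 64 = [] := by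
      unfold pvFindLoop
      rw [if_neg (by omega)]
    simp [hloop, hn]
  · have hpos : 0 < n := by omega
    have hub : n ≤ 2147483648 := by
      have h := hdom
      unfold Dom_getOneBits pvDomInt at h
      exact (of_decide_eq_true h).2
    have h64 : (2 : Nat) ^ 64 = 18446744073709551616 := by norm_num
    have hmub : n.toNat < 2 ^ 64 := by rw [h64]; omega
    have hfuel : n.toNat.size ≤ 0 + 64 := by
      simpa using Nat.size_le.mpr hmub
    have htab : pvFindLoop n 0 0 [] 64
        = (List.range n.toNat.size).map (fun i => (2:Int) ^ i) := by
      rw [pvFindLoop_spec n hpos 64 0 [] 0 hfuel (fun _ => hpos)]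
      simp
    have hrev : (pvFindLoop n 0 0 [] 64).reverse
        = (List.range n.toNat.size).map (fun i => (2:Int) ^ (n.toNat.size - 1 - i)) := by
      rw [htab, reverse_pow_table]
    have hinit : ((n, (0:Int), [(0:Int)]) : Int × Int × List Int)
        = (((n.toNat % 2 ^ (n.toNat.size - 0) : Nat) : Int), (0:Int), (0:Int) :: []) := by
      rw [Nat.sub_zero, Nat.mod_eq_of_lt (Nat.lt_size_self n.toNat),
        Int.toNat_of_nonneg (le_of_lt hpos)]
    have hfilter : (List.range' 0 n.toNat.size).filter
          (fun i => (n.toNat >>> (n.toNat.size - 1 - i)) &&& 1 != 0)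
        = (List.range' 0 n.toNat.size).filter
          (fun i => n.toNat / 2 ^ (n.toNat.size - 1 - i) % 2 == 1) :=
      List.filter_congr (fun i _ => pred_eq n.toNat n.toNat.size i)
    simp only [if_neg hn]
    simp only [hrev, List.length_map, List.length_range]
    rw [show List.range n.toNat.size = List.range' 0 n.toNat.size from List.range_eq_range',
      hinit,
      fold_spec n.toNat ((List.range' 0 n.toNat.size).map (fun i => (2:Int) ^ (n.toNat.size - 1 - i)))
        (fun j hj => by rw [← List.range_eq_range']; exact getD_pow_table n.toNat.size j hj)
        n.toNat.size 0 (by omega) 0 [],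
      hfilter]
    simp
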